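-- pv_equiv track=rewrite | github.com/leehuishi/Hui-Shi-Lee | test3.py | switchchar
-- ===== SOURCE A (Python) =====
-- def switchchar(stringinput):
--     s = stringinput
--     currentchar = s[0]
--     newstring = ''
--     for i in range(len(s)):
--         if(i == len(s)-1):
--             newstring += currentchar
--             break
--         else:
--             nextchar = s[i+1]
--         if(nextchar < currentchar):
--             newstring += nextchar
--             currentchar = currentchar
--         elif(nextchar > currentchar):
--             newstring += currentchar
--             currentchar = nextchar
--         else:
--             newstring += currentchar
--             currentchar = nextchar
--
--     return newstring
-- ===== SOURCE B (Python) =====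
-- def switchchar(stringinput):
--     s = stringinput
--     pm = [s[0]]
--     for c in s[1:]:
--         pm.append(max(pm[-1], c))
--     out = [min(p, n) for p, n in zip(pm, s[1:])]
--     out.append(pm[-1])
--     return ''.join(out)
-- ===== Notes on version B (the rewrite author's own statement) =====
-- stated objective: alternative
-- what changed: A's single loop with running currentchar and branchy comparisons is replaced by a two-pass formulation: build the prefix-maximum list, then emit min(prefix_max[i], s[i+1]) via zip and append the global maximum.
import Mathlib
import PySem

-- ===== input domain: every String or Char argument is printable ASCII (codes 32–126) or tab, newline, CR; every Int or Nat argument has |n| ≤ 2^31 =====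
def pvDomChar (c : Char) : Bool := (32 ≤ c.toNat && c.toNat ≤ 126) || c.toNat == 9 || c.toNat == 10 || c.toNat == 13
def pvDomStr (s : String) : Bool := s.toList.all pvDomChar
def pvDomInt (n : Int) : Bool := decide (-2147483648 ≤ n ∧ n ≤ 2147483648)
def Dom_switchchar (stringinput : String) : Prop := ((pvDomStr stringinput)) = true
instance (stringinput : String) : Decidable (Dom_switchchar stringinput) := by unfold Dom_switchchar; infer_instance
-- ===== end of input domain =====

-- B replaces A's single branchy loop by a two-pass prefix-maximum formulation (alternative decomposition, same cost).

-- ===== PORT A =====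
-- The loop state: `current` = currentchar, `acc` = newstring, `rest` = s[i+1:]
-- (the loop reads nextchar = s[i+1] and breaks exactly when i = len(s)-1, i.e. rest = []).
def switchcharGo : Char → List Char → List Char → List Char
  | current, acc, [] => acc ++ [current]                                  -- i == len(s)-1: append, break
  | current, acc, next :: rest =>
    if next < current then switchcharGo current (acc ++ [next]) rest      -- nextchar < currentchar
    else if current < next then switchcharGo next (acc ++ [current]) rest -- nextchar > currentchar
    else switchcharGo next (acc ++ [current]) rest                        -- equal

def switchchar (stringinput : String) : String :=
  match stringinput.toList with
  | [] => ""                                  -- Python raises IndexError on s[0]; excluded by Pre_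
  | c :: rest => String.mk (switchcharGo c [] rest)

-- ===== PORT B =====
-- pm = [s[0]]; for c in s[1:]: pm.append(max(pm[-1], c))
def scanMax : Char → List Char → List Char
  | p, [] => [p]
  | p, c :: cs => p :: scanMax (max p c) cs

def switchchar_alt (stringinput : String) : String :=
  match stringinput.toList with
  | [] => ""                                  -- s[0] raises here too; excluded by Pre_
  | c :: cs =>
    let pm := scanMax c cs
    String.mk (List.zipWith min pm cs ++ [pm.getLastD c])

-- ===== PRECONDITION & SPEC =====
-- Pre_ excludes only the empty string, on which Python A (and B) raise IndexError at s[0].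
def Pre_switchchar (stringinput : String) : Prop := stringinput ≠ ""
instance (stringinput : String) : Decidable (Pre_switchchar stringinput) := by unfold Pre_switchchar; infer_instance
def pvWitness_switchchar : String := "bca"

def Spec_switchchar (stringinput : String) (out : String) : Prop := out = switchchar_alt stringinput
instance (stringinput : String) (out : String) : Decidable (Spec_switchchar stringinput out) := by unfold Spec_switchchar; infer_instance

-- ===== CLAIM (what is proved, stated in full; the proofs are below) =====
def Claim_equal_switchchar : Prop := ∀ (stringinput : String), Dom_switchchar stringinput → Pre_switchchar stringinput → Spec_switchchar stringinput (switchchar stringinput)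

-- ===== LEMMAS AND PROOFS =====

-- the last entry of the prefix-maximum list is the running maximum (any default)
theorem scanMax_getLastD (l : List Char) : ∀ (p d : Char), (scanMax p l).getLastD d = l.foldl max p := by
  induction l with
  | nil => intro p d; simp [scanMax]
  | cons c cs ih =>
    intro p d
    have hne : scanMax (max p c) cs ≠ [] := by cases cs <;> simp [scanMax]
    rw [scanMax, List.getLastD_cons, ih, List.foldl_cons]

theorem switchcharGo_eq (rest : List Char) : ∀ (current : Char) (acc : List Char),
    switchcharGo current acc rest =
      acc ++ (List.zipWith min (scanMax current rest) rest ++ [rest.foldl max current]) := by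
  induction rest with
  | nil => intro current acc; simp [switchcharGo, scanMax]
  | cons next rest ih =>
    intro current acc
    by_cases h : next < current
    · have hmin : min current next = next := min_eq_right h.le
      have hmax : max current next = current := max_eq_left h.le
      simp [switchcharGo, scanMax, h, ih, hmin, hmax]
    · have hle : current ≤ next := not_lt.mp h
      have hmin : min current next = current := min_eq_left hle
      have hmax : max current next = next := max_eq_right hle
      by_cases h2 : current < next
      · simp [switchcharGo, scanMax, h, h2, ih, hmin, hmax]
      · simp [switchcharGo, scanMax, h, h2, ih, hmin, hmax]

-- ===== VERDICT (by name: the statement is the Claim_ definition above) =====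
theorem switchchar_spec : Claim_equal_switchchar := by
  intro s _ _
  unfold Spec_switchchar switchchar switchchar_alt
  cases h : s.toList with
  | nil => rfl
  | cons c cs =>
    simp only [switchcharGo_eq, scanMax_getLastD]
    simp
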